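-- pv_equiv track=rewrite | github.com/matheus489/VitalConnect3 | ai-service/app/middleware/permissions.py | get_allowed_tools
-- ===== SOURCE A (Python) =====
-- from enum import Enum
-- from typing import Set
--
-- class Role(str, Enum):
--     """User roles in SIDOT."""
--
--     ADMIN = "admin"
--     GESTOR = "gestor"
--     OPERADOR = "operador"
--     MEDICO = "medico"
--
-- PERMISSION_MATRIX: dict[str, Set[str]] = {
--     # All authenticated users can access these
--     "list_occurrences": {
--         Role.ADMIN, Role.GESTOR, Role.OPERADOR, Role.MEDICO
--     },
--     "get_occurrence_details": {
--         Role.ADMIN, Role.GESTOR, Role.OPERADOR, Role.MEDICO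
--     },
--     "search_documentation": {
--         Role.ADMIN, Role.GESTOR, Role.OPERADOR, Role.MEDICO
--     },
--
--     # operador+ (operador, gestor, admin)
--     "update_occurrence_status": {
--         Role.ADMIN, Role.GESTOR, Role.OPERADOR
--     },
--
--     # gestor+ (gestor, admin)
--     "send_team_notification": {
--         Role.ADMIN, Role.GESTOR
--     },
--     "generate_report": {
--         Role.ADMIN, Role.GESTOR
--     },
-- }
--
-- def get_allowed_tools(role: str) -> Set[str]:
--     """
--     Get the set of tools a user role is allowed to execute.
--
--     Args:
--         role: The user's role.
--
--     Returns:
--         Set of tool names the user can execute.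
--     """
--     try:
--         role_enum = Role(role)
--     except ValueError:
--         return set()
--
--     allowed_tools = set()
--     for tool_name, allowed_roles in PERMISSION_MATRIX.items():
--         if role_enum in allowed_roles:
--             allowed_tools.add(tool_name)
--
--     return allowed_tools
-- ===== SOURCE B (Python) =====
-- from enum import Enum
-- from typing import Set
--
-- class Role(str, Enum):
--     ADMIN = "admin"
--     GESTOR = "gestor"
--     OPERADOR = "operador"
--     MEDICO = "medico"
--
-- PERMISSION_MATRIX: dict[str, Set[str]] = {
--     "list_occurrences": {Role.ADMIN, Role.GESTOR, Role.OPERADOR, Role.MEDICO},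
--     "get_occurrence_details": {Role.ADMIN, Role.GESTOR, Role.OPERADOR, Role.MEDICO},
--     "search_documentation": {Role.ADMIN, Role.GESTOR, Role.OPERADOR, Role.MEDICO},
--     "update_occurrence_status": {Role.ADMIN, Role.GESTOR, Role.OPERADOR},
--     "send_team_notification": {Role.ADMIN, Role.GESTOR},
--     "generate_report": {Role.ADMIN, Role.GESTOR},
-- }
--
-- # Inverse index built once: role value -> set of allowed tool names.
-- ROLE_TO_TOOLS: dict[str, Set[str]] = {}
-- for _tool, _roles in PERMISSION_MATRIX.items():
--     for _r in _roles:
--         ROLE_TO_TOOLS.setdefault(_r.value, set()).add(_tool)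
--
-- def get_allowed_tools(role: str) -> Set[str]:
--     return set(ROLE_TO_TOOLS.get(role, set()))
-- ===== Notes on version B (the rewrite author's own statement) =====
-- stated objective: simpler
-- what changed: Replaces the per-call scan-and-filter over PERMISSION_MATRIX with a module-level inverse index ROLE_TO_TOOLS built once, so get_allowed_tools is a single dict lookup returning a fresh copy of the cached set.
import Mathlib
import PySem

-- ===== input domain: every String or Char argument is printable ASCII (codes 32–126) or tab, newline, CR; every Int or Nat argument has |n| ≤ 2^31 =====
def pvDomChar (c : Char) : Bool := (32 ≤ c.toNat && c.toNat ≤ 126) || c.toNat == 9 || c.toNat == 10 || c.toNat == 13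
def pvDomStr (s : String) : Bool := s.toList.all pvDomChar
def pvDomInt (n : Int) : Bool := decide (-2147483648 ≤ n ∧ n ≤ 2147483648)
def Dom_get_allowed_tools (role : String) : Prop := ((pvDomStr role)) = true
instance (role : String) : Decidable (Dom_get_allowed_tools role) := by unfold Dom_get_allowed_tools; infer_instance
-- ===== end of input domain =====

-- B replaces A's per-call scan over PERMISSION_MATRIX by a one-time inverse index
-- ROLE_TO_TOOLS (role -> tools), so the call is a single lookup (objective: simpler).

-- ===== PORT A =====
-- Role enum values, in declaration order
def pvRoleValues : List String := ["admin", "gestor", "operador", "medico"]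

-- PERMISSION_MATRIX: tool name -> set of role values (sets as PySem.Set over role values)
def pvPermissionMatrix : List (String × List String) :=
  [("list_occurrences", ["admin", "gestor", "operador", "medico"]),
   ("get_occurrence_details", ["admin", "gestor", "operador", "medico"]),
   ("search_documentation", ["admin", "gestor", "operador", "medico"]),
   ("update_occurrence_status", ["admin", "gestor", "operador"]),
   ("send_team_notification", ["admin", "gestor"]),
   ("generate_report", ["admin", "gestor"])]

-- Role(role) succeeds iff role is one of the enum values; ValueError -> return set()
def get_allowed_tools (role : String) : List String :=
  if role ∈ pvRoleValues then
    pvPermissionMatrix.foldl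
      (fun allowed_tools p =>
        if role ∈ p.2 then PySem.Set.add allowed_tools p.1 else allowed_tools)
      []
  else []

-- ===== PORT B =====
-- the module-level loop building ROLE_TO_TOOLS (setdefault(r, set()).add(tool))
def pvRoleToTools : PySem.Dict String (List String) :=
  pvPermissionMatrix.foldl
    (fun d p =>
      p.2.foldl (fun d r => PySem.Dict.modify d r [] (fun s => PySem.Set.add s p.1)) d)
    PySem.Dict.empty

def get_allowed_tools_alt (role : String) : List String :=
  PySem.Dict.getD pvRoleToTools role []

-- ===== PRECONDITION & SPEC =====
def Spec_get_allowed_tools (role : String) (out : List String) : Prop := out = get_allowed_tools_alt role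
instance (role : String) (out : List String) : Decidable (Spec_get_allowed_tools role out) := by unfold Spec_get_allowed_tools; infer_instance

-- ===== CLAIM (what is proved, stated in full; the proofs are below) =====
def Claim_equal_get_allowed_tools : Prop := ∀ (role : String), Dom_get_allowed_tools role → Spec_get_allowed_tools role (get_allowed_tools role)

-- ===== LEMMAS AND PROOFS =====

-- the items list of the inverse index, for the invalid-role case
theorem pvItems_eval : pvRoleToTools.items =
    [("admin", ["list_occurrences", "get_occurrence_details", "search_documentation",
                "update_occurrence_status", "send_team_notification", "generate_report"]),
     ("gestor", ["list_occurrences", "get_occurrence_details", "search_documentation",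
                 "update_occurrence_status", "send_team_notification", "generate_report"]),
     ("operador", ["list_occurrences", "get_occurrence_details", "search_documentation",
                   "update_occurrence_status"]),
     ("medico", ["list_occurrences", "get_occurrence_details", "search_documentation"])] := by
  rfl

-- ===== VERDICT (by name: the statement is the Claim_ definition above) =====
theorem get_allowed_tools_spec : Claim_equal_get_allowed_tools := by
  intro role _
  unfold Spec_get_allowed_tools
  by_cases h1 : role = "admin"; · subst h1; rfl
  by_cases h2 : role = "gestor"; · subst h2; rfl
  by_cases h3 : role = "operador"; · subst h3; rfl
  by_cases h4 : role = "medico"; · subst h4; rfl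
  have e1 : ("admin" == role) = false := beq_eq_false_iff_ne.mpr (fun h => h1 h.symm)
  have e2 : ("gestor" == role) = false := beq_eq_false_iff_ne.mpr (fun h => h2 h.symm)
  have e3 : ("operador" == role) = false := beq_eq_false_iff_ne.mpr (fun h => h3 h.symm)
  have e4 : ("medico" == role) = false := beq_eq_false_iff_ne.mpr (fun h => h4 h.symm)
  simp [get_allowed_tools, get_allowed_tools_alt, pvRoleValues,
        PySem.Dict.getD, PySem.Dict.get?, pvItems_eval, List.find?,
        h1, h2, h3, h4, e1, e2, e3, e4]
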